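-- pv_equiv track=rewrite | github.com/WaterMelon272/project-2048-ai | backend/tmp.py | grid_to_bitboard
-- ===== SOURCE A (Python) =====
-- import math
--
-- def grid_to_bitboard(grid):
--         board = 0
--         for r in range(4):
--             for c in range(4):
--                 val = grid[r][c]
--                 power = int(math.log2(val)) if val > 0 else 0
--                 board |= (power << ((r * 4 + c) * 4))
--         return board
-- ===== SOURCE B (Python) =====
-- def _pack_row(row, c=0):
--     if c == 4:
--         return 0
--     v = row[c]
--     p = v.bit_length() - 1 if v > 0 else 0
--     return p | (_pack_row(row, c + 1) << 4)
--
--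
-- def _pack_rows(grid, r=0):
--     if r == 4:
--         return 0
--     return _pack_row(grid[r]) | (_pack_rows(grid, r + 1) << 16)
--
--
-- def grid_to_bitboard(grid):
--     return _pack_rows(grid)
-- ===== Notes on version B (the rewrite author's own statement) =====
-- stated objective: alternative
-- what changed: Replaces the nested loop that ORs each exponent into place at an explicitly computed shift offset by a recursive two-level divide-and-conquer: each row is packed on its own into a 16-bit word Horner-style low-nibble-first (p | rest << 4), the four row words are then combined recursively at 16-bit strides, and the per-cell exponent is v.bit_length()-1 instead of int(math.log2(v)) (equal for 0 < v <= 2^31).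
import Mathlib
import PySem

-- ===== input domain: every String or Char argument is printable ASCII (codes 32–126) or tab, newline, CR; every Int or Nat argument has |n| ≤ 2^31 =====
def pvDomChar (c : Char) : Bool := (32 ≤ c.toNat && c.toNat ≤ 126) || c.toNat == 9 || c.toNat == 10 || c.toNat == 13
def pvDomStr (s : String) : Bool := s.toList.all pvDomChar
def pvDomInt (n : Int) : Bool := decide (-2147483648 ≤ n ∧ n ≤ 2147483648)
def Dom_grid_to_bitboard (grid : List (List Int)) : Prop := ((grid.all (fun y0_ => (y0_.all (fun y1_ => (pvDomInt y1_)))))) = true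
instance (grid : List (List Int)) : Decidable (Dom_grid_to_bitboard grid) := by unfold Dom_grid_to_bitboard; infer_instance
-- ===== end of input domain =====

-- B replaces A's nested loop with OR-at-computed-offset by a recursive two-level
-- decomposition (each row packed Horner-style into its own word, row words combined at
-- 16-bit strides) with the exponent taken from bit_length; same cost ("alternative").
-- ===== PORT A =====
-- Python's int(math.log2(val)) for val > 0: exact floor(log2 val) for 1 <= val <= 2^31
-- (the double rounding of math.log2 cannot cross an integer in that range), which is
-- Nat.log2 of val.toNat.  Likewise B's v.bit_length()-1 for v > 0 is Nat.log2 v.toNat,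
-- so both ports share this helper.
def pvPower (val : Int) : Nat :=
  if val > 0 then val.toNat.log2 else 0

-- grid[r][c]: Pre_ guarantees both indices in range, so the getD defaults are never taken.
def pvCell (grid : List (List Int)) (r c : Int) : Int :=
  (PySem.List.pyGet? ((PySem.List.pyGet? grid r).getD []) c).getD 0

def grid_to_bitboard (grid : List (List Int)) : Int :=
  -- board stays a nonnegative Python int; modelled as Nat and cast at the end
  ((PySem.List.pyRange 0 4 1).foldl (fun board r =>
    (PySem.List.pyRange 0 4 1).foldl (fun board c =>
      board ||| (pvPower (pvCell grid r c) <<< ((r * 4 + c) * 4).toNat)) board) 0 : Nat)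

-- ===== PORT B =====
-- _pack_row(row, c): Python's 'if c == 4: return 0' guard is ported as '4 ≤ c' so the
-- recursion is total; for every reachable call (c ≤ 4) the two guards coincide.
def pvPackRow (row : List Int) (c : Nat) : Nat :=
  if 4 ≤ c then 0
  else
    let v := (PySem.List.pyGet? row (c : Int)).getD 0
    pvPower v ||| (pvPackRow row (c + 1)) <<< 4
termination_by 4 - c

-- _pack_rows(grid, r), same totalisation of the 'r == 4' guard
def pvPackRows (grid : List (List Int)) (r : Nat) : Nat :=
  if 4 ≤ r then 0
  else
    pvPackRow ((PySem.List.pyGet? grid (r : Int)).getD []) 0 ||| (pvPackRows grid (r + 1)) <<< 16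
termination_by 4 - r

def grid_to_bitboard_alt (grid : List (List Int)) : Int :=
  (pvPackRows grid 0 : Nat)

-- ===== PRECONDITION & SPEC =====
-- Pre_ excludes exactly the inputs where A raises IndexError: fewer than 4 rows, or one
-- of the first 4 rows shorter than 4.
def Pre_grid_to_bitboard (grid : List (List Int)) : Prop :=
  4 ≤ grid.length ∧ ∀ row ∈ grid.take 4, 4 ≤ row.length
instance (grid : List (List Int)) : Decidable (Pre_grid_to_bitboard grid) := by
  unfold Pre_grid_to_bitboard; infer_instance
def pvWitness_grid_to_bitboard : List (List Int) :=
  [[0, 2, 4, 8], [16, 1, 0, 3], [5, 7, 9, 2], [1, 2, 3, 4]]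
def Spec_grid_to_bitboard (grid : List (List Int)) (out : Int) : Prop := out = grid_to_bitboard_alt grid
instance (grid : List (List Int)) (out : Int) : Decidable (Spec_grid_to_bitboard grid out) := by unfold Spec_grid_to_bitboard; infer_instance

-- ===== CLAIM (what is proved, stated in full; the proofs are below) =====
def Claim_equal_grid_to_bitboard : Prop := ∀ (grid : List (List Int)), Dom_grid_to_bitboard grid → Pre_grid_to_bitboard grid → Spec_grid_to_bitboard grid (grid_to_bitboard grid)

-- ===== LEMMAS AND PROOFS =====
-- pyGet? on a cons-literal list at the numeral indices 0..3
theorem pv_pg0 {α : Type} (x0 : α) (xs : List α) :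
    PySem.List.pyGet? (x0 :: xs) 0 = some x0 := by
  simp [PySem.List.pyGet?, PySem.List.pyIdx?]
theorem pv_pg1 {α : Type} (x0 x1 : α) (xs : List α) :
    PySem.List.pyGet? (x0 :: x1 :: xs) 1 = some x1 := by
  simp [PySem.List.pyGet?, PySem.List.pyIdx?]
theorem pv_pg2 {α : Type} (x0 x1 x2 : α) (xs : List α) :
    PySem.List.pyGet? (x0 :: x1 :: x2 :: xs) 2 = some x2 := by
  simp [PySem.List.pyGet?, PySem.List.pyIdx?]
  rw [if_pos (by omega)]
  simp
theorem pv_pg3 {α : Type} (x0 x1 x2 x3 : α) (xs : List α) :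
    PySem.List.pyGet? (x0 :: x1 :: x2 :: x3 :: xs) 3 = some x3 := by
  simp [PySem.List.pyGet?, PySem.List.pyIdx?]
  rw [if_pos (by omega)]
  simp
-- shifting distributes over bitwise or
theorem pv_or_shiftLeft (a b n : Nat) : (a ||| b) <<< n = (a <<< n) ||| (b <<< n) := by
  apply Nat.eq_of_testBit_eq
  intro i
  simp [Nat.testBit_shiftLeft, Nat.testBit_or]
  by_cases h : n ≤ i <;> simp [h]
theorem pv_shiftLeft_shiftLeft (a m n : Nat) : (a <<< m) <<< n = a <<< (m + n) := by
  rw [Nat.shiftLeft_add]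

-- fully unfold B's row recursion on a 4-element literal row
theorem pv_packRow_eval (a0 a1 a2 a3 : Int) (t : List Int) :
    pvPackRow (a0 :: a1 :: a2 :: a3 :: t) 0 =
      pvPower a0 ||| (pvPower a1 ||| (pvPower a2 ||| (pvPower a3 ||| 0 <<< 4) <<< 4) <<< 4) <<< 4 := by
  rw [pvPackRow, pvPackRow, pvPackRow, pvPackRow, pvPackRow]
  simp [pv_pg1, pv_pg2, pv_pg3]

-- ===== VERDICT (by name: the statement is the Claim_ definition above) =====
set_option maxHeartbeats 1000000 in
theorem grid_to_bitboard_spec : Claim_equal_grid_to_bitboard := by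
  intro grid _ pre
  obtain ⟨hlen, hrows⟩ := pre
  rcases grid with _ | ⟨r0, _ | ⟨r1, _ | ⟨r2, _ | ⟨r3, rest⟩⟩⟩⟩ <;> simp at hlen
  have h0 := hrows r0 (by simp)
  have h1 := hrows r1 (by simp)
  have h2 := hrows r2 (by simp)
  have h3 := hrows r3 (by simp)
  rcases r0 with _ | ⟨a0, _ | ⟨a1, _ | ⟨a2, _ | ⟨a3, t0⟩⟩⟩⟩ <;> simp at h0
  rcases r1 with _ | ⟨b0, _ | ⟨b1, _ | ⟨b2, _ | ⟨b3, t1⟩⟩⟩⟩ <;> simp at h1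
  rcases r2 with _ | ⟨c0, _ | ⟨c1, _ | ⟨c2, _ | ⟨c3, t2⟩⟩⟩⟩ <;> simp at h2
  rcases r3 with _ | ⟨d0, _ | ⟨d1, _ | ⟨d2, _ | ⟨d3, t3⟩⟩⟩⟩ <;> simp at h3
  have hR : PySem.List.pyRange 0 4 1 = [0, 1, 2, 3] := by decide
  unfold Spec_grid_to_bitboard grid_to_bitboard grid_to_bitboard_alt
  rw [pvPackRows, pvPackRows, pvPackRows, pvPackRows, pvPackRows]
  simp only [hR, List.foldl_cons, List.foldl_nil]
  norm_num [pvCell, pv_pg0, pv_pg1, pv_pg2, pv_pg3, pv_packRow_eval]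
  simp [show Int.toNat 4 = 4 from rfl, show Int.toNat 8 = 8 from rfl, show Int.toNat 12 = 12 from rfl, show Int.toNat 16 = 16 from rfl, show Int.toNat 20 = 20 from rfl, show Int.toNat 24 = 24 from rfl, show Int.toNat 28 = 28 from rfl, show Int.toNat 32 = 32 from rfl, show Int.toNat 36 = 36 from rfl, show Int.toNat 40 = 40 from rfl, show Int.toNat 44 = 44 from rfl, show Int.toNat 48 = 48 from rfl, show Int.toNat 52 = 52 from rfl, show Int.toNat 56 = 56 from rfl, show Int.toNat 60 = 60 from rfl, pv_or_shiftLeft, pv_shiftLeft_shiftLeft, Nat.lor_assoc]
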